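-- pv_equiv track=rewrite | github.com/dougbertwashere/mppt60 | mppt60.py | decodeFaultBitMap0
-- ===== SOURCE A (Python) =====
-- def decodeFaultBitMap0(value):
--     faultMap = {
--         1<<0:"F2:Capacitor Over-Temperature",
--         1<<1:"F4:Battery Over-Temperature",
--         1<<2:"F5:Ambient Over-Temperature",
--         1<<3:"F9:DC Over-Voltage",
--         1<<4:"F10:Output Under-Voltage Immediate",
--         1<<5:"F11:Output Under-Voltage",
--         1<<6:"F26:Auxiliary Power Supply",
--         1<<7:"F30:Battery Under-Temperature",
--         1<<8:"F54:Auxiliary Power Supply",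
--         1<<9:"F55:Heatsink Over-Temperature",
--         1<<10:"F56:Ground Fault",
--         1<<11:"F69:Configuration Fault",
--         1<<12:"F70:DC Over-Voltage",
--         1<<13:"F71:DC Over-current2",
--         1<<14:"F72:SPS Overload",
--         1<<15:"F73:Slow Output Over-Current",
--     }
--
--     result = ""
--
--     # Scan each bit in the value, if set then map to a decoded string from the dict
--     for i in range (16):
--         bitNum = 1 << i
--         if value & bitNum:
--             result += faultMap[bitNum] + " "
--
--     return result
-- ===== SOURCE B (Python) =====
-- FAULT_NAMES = [
--     "F2:Capacitor Over-Temperature",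
--     "F4:Battery Over-Temperature",
--     "F5:Ambient Over-Temperature",
--     "F9:DC Over-Voltage",
--     "F10:Output Under-Voltage Immediate",
--     "F11:Output Under-Voltage",
--     "F26:Auxiliary Power Supply",
--     "F30:Battery Under-Temperature",
--     "F54:Auxiliary Power Supply",
--     "F55:Heatsink Over-Temperature",
--     "F56:Ground Fault",
--     "F69:Configuration Fault",
--     "F70:DC Over-Voltage",
--     "F71:DC Over-current2",
--     "F72:SPS Overload",
--     "F73:Slow Output Over-Current",
-- ]
--
--
-- def _decode_range(lo, width, v):
--     # Decode the fault bits of v lying in [lo, lo+width); v has no set bits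
--     # outside that range.  Divide and conquer: an all-zero subrange is skipped
--     # wholesale, a one-bit range yields its name, otherwise split in half and
--     # concatenate (left half first, preserving ascending bit order).
--     if v == 0:
--         return ""
--     if width == 1:
--         return FAULT_NAMES[lo] + " "
--     half = width // 2
--     mid = lo + half
--     low = v & ((1 << mid) - 1)
--     high = (v >> mid) << mid
--     return _decode_range(lo, half, low) + _decode_range(mid, width - half, high)
--
--
-- def decodeFaultBitMap0(value):
--     return _decode_range(0, 16, value & 0xFFFF)
-- ===== Notes on version B (the rewrite author's own statement) =====
-- stated objective: alternative
-- what changed: Instead of A's linear scan testing all 16 fixed masks against a dict, B masks to 16 bits once and decodes by divide-and-conquer: it recursively splits the bit range in half, skips any all-zero half wholesale, and concatenates the left and right decodings, indexing a plain name list at single-bit leaves.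
import Mathlib
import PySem

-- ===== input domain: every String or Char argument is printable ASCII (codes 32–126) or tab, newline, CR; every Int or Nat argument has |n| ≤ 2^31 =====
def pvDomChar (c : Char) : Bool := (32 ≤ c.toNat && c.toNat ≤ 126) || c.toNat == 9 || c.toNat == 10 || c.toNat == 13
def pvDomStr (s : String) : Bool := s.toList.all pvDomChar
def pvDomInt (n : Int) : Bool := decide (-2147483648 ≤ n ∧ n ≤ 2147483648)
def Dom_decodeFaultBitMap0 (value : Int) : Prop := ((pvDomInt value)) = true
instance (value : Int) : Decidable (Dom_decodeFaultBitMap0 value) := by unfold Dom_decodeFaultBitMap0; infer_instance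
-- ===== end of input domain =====

-- B replaces A's linear scan of all 16 masks (dict lookups, string accumulation) by a
-- divide-and-conquer decode: mask once to 16 bits, then recursively split the bit range in
-- half, skipping any all-zero half wholesale; same return value (no speed claim).

-- ===== PORT A =====
def decodeFaultBitMap0 (value : Int) : String :=
  -- faultMap: the keys are the literal values of 1<<0 … 1<<15
  let faultMap : PySem.Dict Int String :=
    PySem.Dict.mk [(1, "F2:Capacitor Over-Temperature"), (2, "F4:Battery Over-Temperature"),
     (4, "F5:Ambient Over-Temperature"), (8, "F9:DC Over-Voltage"),
     (16, "F10:Output Under-Voltage Immediate"), (32, "F11:Output Under-Voltage"),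
     (64, "F26:Auxiliary Power Supply"), (128, "F30:Battery Under-Temperature"),
     (256, "F54:Auxiliary Power Supply"), (512, "F55:Heatsink Over-Temperature"),
     (1024, "F56:Ground Fault"), (2048, "F69:Configuration Fault"),
     (4096, "F70:DC Over-Voltage"), (8192, "F71:DC Over-current2"),
     (16384, "F72:SPS Overload"), (32768, "F73:Slow Output Over-Current")]
  (PySem.List.pyRange 0 16).foldl
    (fun result i =>
      let bitNum : Int := 1 <<< i.toNat   -- bitNum = 1 << i (i ∈ range(16), so i ≥ 0 and i.toNat = i)
      if PySem.Int.band value bitNum ≠ 0 then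
        -- faultMap[bitNum]: the key bitNum = 1<<i, i < 16, is always present, so getD never
        -- takes its default (no KeyError is reachable)
        result ++ ((PySem.Dict.get? faultMap bitNum).getD "") ++ " "
      else result)
    ""

-- ===== PORT B =====
def pvFaultNames : List String :=
  ["F2:Capacitor Over-Temperature", "F4:Battery Over-Temperature",
   "F5:Ambient Over-Temperature", "F9:DC Over-Voltage",
   "F10:Output Under-Voltage Immediate", "F11:Output Under-Voltage",
   "F26:Auxiliary Power Supply", "F30:Battery Under-Temperature",
   "F54:Auxiliary Power Supply", "F55:Heatsink Over-Temperature",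
   "F56:Ground Fault", "F69:Configuration Fault",
   "F70:DC Over-Voltage", "F71:DC Over-current2",
   "F72:SPS Overload", "F73:Slow Output Over-Current"]

-- Source B's _decode_range.  v stays a Nat: the top call passes value & 0xFFFF ≥ 0 and &, >>, <<
-- preserve nonnegativity, so Nat arithmetic is Python-exact here.  The base test is written
-- `width ≤ 1` (Python writes `width == 1`): every call starts at width 16 and halves of any
-- width ≥ 2 are ≥ 1, so width = 0 is unreachable and the two tests agree on every reached
-- call; `≤ 1` additionally makes the Lean recursion total.  FAULT_NAMES[lo]: lo < 16 at
-- every reached leaf, so getD never takes its default (no IndexError is reachable).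
def pvDecodeRange (lo width v : Nat) : String :=
  if v = 0 then ""
  else if width ≤ 1 then pvFaultNames.getD lo "" ++ " "
  else
    let half := width / 2
    let mid := lo + half
    let low := v &&& ((1 <<< mid) - 1)
    let high := (v >>> mid) <<< mid
    pvDecodeRange lo half low ++ pvDecodeRange mid (width - half) high
termination_by width
decreasing_by all_goals omega

def decodeFaultBitMap0_alt (value : Int) : String :=
  pvDecodeRange 0 16 (PySem.Int.band value 65535).toNat   -- value & 0xFFFF (≥ 0, so toNat is exact)

-- ===== PRECONDITION & SPEC =====
def Spec_decodeFaultBitMap0 (value : Int) (out : String) : Prop := out = decodeFaultBitMap0_alt value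
instance (value : Int) (out : String) : Decidable (Spec_decodeFaultBitMap0 value out) := by unfold Spec_decodeFaultBitMap0; infer_instance

-- ===== CLAIM (what is proved, stated in full; the proofs are below) =====
def Claim_equal_decodeFaultBitMap0 : Prop := ∀ (value : Int), Dom_decodeFaultBitMap0 value → Spec_decodeFaultBitMap0 value (decodeFaultBitMap0 value)

-- ===== LEMMAS AND PROOFS =====

-- w = (value & 0xFFFF) is a 16-bit number
theorem pv_mask_lt (a : Int) : (PySem.Int.band a 65535).toNat < 2 ^ 16 := by
  rcases le_or_gt 0 a with h | h
  · rw [PySem.Int.band_of_nonneg h (by norm_num)]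
    have : a.toNat &&& (65535:Int).toNat ≤ (65535:Int).toNat := Nat.and_le_right
    simp at this ⊢
    omega
  · have h1 : ¬ (0:Int) ≤ a := by omega
    simp only [PySem.Int.band, if_neg h1, if_pos (by norm_num : (0:Int) ≤ 65535)]
    simp
    omega

-- per-bit bridge: A's test `value & (1<<i) != 0` reads exactly bit i of w = (value & 0xFFFF)
theorem pv_bridge (a : Int) (i : Nat) (hi : i < 16) :
    (PySem.Int.band a ((1 : Int) <<< i) ≠ 0) ↔ ((PySem.Int.band a 65535).toNat).testBit i = true := by
  have hsh : ((1 : Int) <<< i) = ((2 ^ i : Nat) : Int) := by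
    rw [Int.shiftLeft_eq]; push_cast; ring
  have h65 : (65535 : Int) = ((65535 : Nat) : Int) := by norm_num
  have hp : (2 : Nat) ^ i ≠ 0 := by positivity
  rcases le_or_gt 0 a with h | h
  · rw [hsh, h65, ← Int.toNat_of_nonneg h]
    rw [PySem.Int.band_natCast, PySem.Int.band_natCast]
    rw [Int.toNat_natCast]
    rw [show (65535 : Nat) = 2 ^ 16 - 1 by norm_num, Nat.and_two_pow_sub_one_eq_mod]
    rw [Nat.testBit_mod_two_pow]
    rw [Nat.and_two_pow]
    cases ht : a.toNat.testBit i
    · simp [hi]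
    · simp [hi]
  · have h1 : ¬ (0:Int) ≤ a := by omega
    have hb2 : (0:Int) ≤ ((2 ^ i : Nat) : Int) := by positivity
    rw [hsh]
    simp only [PySem.Int.band, if_neg h1, if_pos hb2, if_pos (by norm_num : (0:Int) ≤ 65535)]
    set m : Nat := (-a - 1).toNat with hm
    have e1 : ((2 ^ i : Nat) : Int).toNat = 2 ^ i := Int.toNat_natCast _
    have e2 : (65535 : Int).toNat = 2 ^ 16 - 1 := by decide
    rw [e1, e2]
    rw [Nat.land_comm (2 ^ i) m, Nat.and_two_pow]
    rw [Nat.land_comm (2 ^ 16 - 1) m, Nat.and_two_pow_sub_one_eq_mod]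
    have hlt : m % 2 ^ 16 < 2 ^ 16 := Nat.mod_lt _ (by norm_num)
    have e3 : (((2 ^ 16 - 1 - m % 2 ^ 16 : Nat) : Int)).toNat = 2 ^ 16 - (m % 2 ^ 16 + 1) := by
      omega
    rw [e3, Nat.testBit_two_pow_sub_succ hlt i, Nat.testBit_mod_two_pow]
    cases ht : m.testBit i
    · simp [hi]
    · simp [hi]

-- "".join distributes over cons when the separator is empty
theorem pv_join_cons (x : String) (xs : List String) :
    PySem.Str.join "" (x :: xs) = x ++ PySem.Str.join "" xs := by
  have hinj : ∀ s t : String, s.toList = t.toList → s = t := by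
    intro s t h
    have := congrArg String.ofList h
    simpa using this
  apply hinj
  cases xs with
  | nil => simp [PySem.Str.toList_join, PySem.Chars.join_singleton, PySem.Chars.join_nil]
  | cons y ys => simp [PySem.Str.toList_join, PySem.Chars.join_cons_cons]

-- …and over append
theorem pv_join_append (xs ys : List String) :
    PySem.Str.join "" (xs ++ ys) = PySem.Str.join "" xs ++ PySem.Str.join "" ys := by
  induction xs with
  | nil =>
      have h : PySem.Str.join "" ([] : List String) = "" := rfl
      simp [h]
  | cons x xs ih =>
      rw [List.cons_append, pv_join_cons, pv_join_cons, ih, String.append_assoc]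

-- A's direct string accumulation equals joining the same pieces collected in a list
theorem pv_fold_join (p : Nat → Bool) (f : Nat → String) (l : List Nat) (r : String) :
    List.foldl (fun r j => if p j then r ++ f j else r) r l
      = r ++ PySem.Str.join "" ((l.filter p).map f) := by
  induction l generalizing r with
  | nil =>
      have h : PySem.Str.join "" [] = "" := rfl
      simp [h]
  | cons a l ih =>
      by_cases hp : p a
      · simp only [List.foldl_cons, List.filter_cons, hp, if_pos, List.map_cons]
        rw [ih, pv_join_cons, ← String.append_assoc]
      · simp only [List.foldl_cons, List.filter_cons, hp, Bool.false_eq_true, ite_false]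
        exact ih r

-- fold over the Int-cast copy of a Nat list agrees with the Nat fold, given stepwise agreement
theorem pv_foldl_cast {f : String → Int → String} {g : String → Nat → String}
    (h : ∀ (acc : String) (j : Nat), j < 16 → f acc ((j : Nat) : Int) = g acc j) :
    ∀ (l : List Nat), (∀ j ∈ l, j < 16) → ∀ (init : String),
      List.foldl f init (l.map (fun k : Nat => (k : Int))) = List.foldl g init l := by
  intro l
  induction l with
  | nil => intro _ init; rfl
  | cons a l ih =>
      intro hl init
      rw [List.map_cons, List.foldl_cons, List.foldl_cons, h init a (hl a List.mem_cons_self)]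
      exact ih (fun j hj => hl j (List.mem_cons_of_mem a hj)) _

-- A in closed form over the bits of w = (value & 0xFFFF)
theorem pv_A_closed (value : Int) :
    decodeFaultBitMap0 value
      = List.foldl
          (fun r j => if ((PySem.Int.band value 65535).toNat).testBit j then
              r ++ (pvFaultNames.getD j "" ++ " ") else r)
          "" (List.range 16) := by
  unfold decodeFaultBitMap0
  rw [show PySem.List.pyRange 0 16 = (List.range 16).map (fun k : Nat => (k : Int)) from by decide]
  apply pv_foldl_cast
  · intro acc j hj'
    show (let bitNum : Int := ((1 <<< j : Nat) : Int)
      if PySem.Int.band value bitNum ≠ 0 then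
        acc ++ ((PySem.Dict.get? (PySem.Dict.mk [((1:Int), "F2:Capacitor Over-Temperature"), (2, "F4:Battery Over-Temperature"),
     (4, "F5:Ambient Over-Temperature"), (8, "F9:DC Over-Voltage"),
     (16, "F10:Output Under-Voltage Immediate"), (32, "F11:Output Under-Voltage"),
     (64, "F26:Auxiliary Power Supply"), (128, "F30:Battery Under-Temperature"),
     (256, "F54:Auxiliary Power Supply"), (512, "F55:Heatsink Over-Temperature"),
     (1024, "F56:Ground Fault"), (2048, "F69:Configuration Fault"),
     (4096, "F70:DC Over-Voltage"), (8192, "F71:DC Over-current2"),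
     (16384, "F72:SPS Overload"), (32768, "F73:Slow Output Over-Current")]) bitNum).getD "") ++ " "
      else acc) = _
    simp only []
    rw [show ((1 <<< j : Nat) : Int) = (1 : Int) <<< j from by
      rw [Int.shiftLeft_eq, Nat.shiftLeft_eq]; push_cast; ring]
    by_cases hc : ((PySem.Int.band value 65535).toNat).testBit j = true
    · rw [if_pos ((pv_bridge value j hj').mpr hc), if_pos hc, String.append_assoc]
      have hd : ((PySem.Dict.get? (PySem.Dict.mk [((1:Int), "F2:Capacitor Over-Temperature"), (2, "F4:Battery Over-Temperature"),
       (4, "F5:Ambient Over-Temperature"), (8, "F9:DC Over-Voltage"),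
       (16, "F10:Output Under-Voltage Immediate"), (32, "F11:Output Under-Voltage"),
       (64, "F26:Auxiliary Power Supply"), (128, "F30:Battery Under-Temperature"),
       (256, "F54:Auxiliary Power Supply"), (512, "F55:Heatsink Over-Temperature"),
       (1024, "F56:Ground Fault"), (2048, "F69:Configuration Fault"),
       (4096, "F70:DC Over-Voltage"), (8192, "F71:DC Over-current2"),
       (16384, "F72:SPS Overload"), (32768, "F73:Slow Output Over-Current")]) ((1:Int) <<< j)).getD "")
         = pvFaultNames.getD j "" := by
        interval_cases j <;> rfl
      rw [hd]
    · rw [if_neg (fun hh => hc ((pv_bridge value j hj').mp hh)), if_neg hc]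
  · intro j hj
    exact List.mem_range.mp hj

-- B's recursion in closed form: on a v whose set bits all lie in [lo, lo+width), it produces
-- one piece per set bit of that range, in ascending order
theorem pv_range_closed : ∀ (width lo v : Nat),
    (∀ j, v.testBit j = true → lo ≤ j ∧ j < lo + width) →
    pvDecodeRange lo width v
      = PySem.Str.join "" (((List.range' lo width).filter v.testBit).map
          (fun j => pvFaultNames.getD j "" ++ " ")) := by
  intro width
  induction width using Nat.strong_induction_on with
  | _ width IH =>
    intro lo v hinv
    by_cases hv0 : v = 0
    · subst hv0
      rw [pvDecodeRange]
      have hf : (List.range' lo width).filter (Nat.testBit 0) = [] := by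
        simp [Nat.zero_testBit]
      simp [hf]
      rfl
    · obtain ⟨i, hi, _⟩ := Nat.exists_most_significant_bit hv0
      have hiw := hinv i hi
      by_cases hw : width ≤ 1
      · have hweq : width = 1 := by omega
        have hieq : i = lo := by omega
        have hfl : (List.range' lo width).filter v.testBit = [lo] := by
          rw [hweq]
          simp [List.range', List.filter, hieq ▸ hi]
        rw [pvDecodeRange, if_neg hv0, if_pos hw, hfl]
        rw [List.map_cons, List.map_nil, pv_join_cons]
        have h0 : PySem.Str.join "" ([] : List String) = "" := rfl
        simp [h0]
      · rw [pvDecodeRange, if_neg hv0, if_neg hw]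
        simp only []
        set half := width / 2 with hhalf
        set mid := lo + half with hmid
        set low := v &&& ((1 <<< mid) - 1) with hlow
        set high := (v >>> mid) <<< mid with hhigh
        have hlowbit : ∀ j, low.testBit j = (v.testBit j && decide (j < mid)) := by
          intro j
          rw [hlow, Nat.testBit_and, Nat.shiftLeft_eq, one_mul,
            Nat.testBit_two_pow_sub_one]
        have hhighbit : ∀ j, high.testBit j = (v.testBit j && decide (mid ≤ j)) := by
          intro j
          rw [hhigh, Nat.testBit_shiftLeft]
          by_cases hj : mid ≤ j
          · rw [Nat.testBit_shiftRight]
            have : mid + (j - mid) = j := by omega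
            simp [hj, this]
          · simp [hj]
        have hIHl := IH half (by omega) lo low (by
          intro j hj
          rw [hlowbit] at hj
          have h1 := (Bool.and_eq_true _ _).mp hj
          have h2 := hinv j h1.1
          have h3 : j < mid := of_decide_eq_true h1.2
          omega)
        have hIHr := IH (width - half) (by omega) mid high (by
          intro j hj
          rw [hhighbit] at hj
          have h1 := (Bool.and_eq_true _ _).mp hj
          have h2 := hinv j h1.1
          have h3 : mid ≤ j := of_decide_eq_true h1.2
          omega)
        rw [hIHl, hIHr, ← pv_join_append, ← List.map_append]
        have hfl : (List.range' lo half).filter low.testBit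
            = (List.range' lo half).filter v.testBit := by
          apply List.filter_congr
          intro j hj
          have hjm : j < mid := by
            have := List.mem_range'.mp hj
            omega
          rw [hlowbit]
          simp [hjm]
        have hfh : (List.range' mid (width - half)).filter high.testBit
            = (List.range' mid (width - half)).filter v.testBit := by
          apply List.filter_congr
          intro j hj
          have hjm : mid ≤ j := by
            have := List.mem_range'.mp hj
            omega
          rw [hhighbit]
          simp [hjm]
        rw [hfl, hfh, ← List.filter_append]
        have hsplit : List.range' lo half ++ List.range' mid (width - half)
            = List.range' lo width := by
          rw [hmid]
          rw [List.range'_append_1]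
          congr 1
          omega
        rw [hsplit]

-- ===== VERDICT (by name: the statement is the Claim_ definition above) =====
theorem decodeFaultBitMap0_spec : Claim_equal_decodeFaultBitMap0 := by
  intro value _
  unfold Spec_decodeFaultBitMap0
  have hw := pv_mask_lt value
  have hB : decodeFaultBitMap0_alt value
      = pvDecodeRange 0 16 ((PySem.Int.band value 65535).toNat) := rfl
  rw [hB, pv_range_closed 16 0 _ (by
    intro j hj
    constructor
    · omega
    · by_contra hc
      have h16 : 16 ≤ j := by omega
      have : ((PySem.Int.band value 65535).toNat) < 2 ^ j :=
        lt_of_lt_of_le hw (Nat.pow_le_pow_right (by norm_num) h16)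
      rw [Nat.testBit_lt_two_pow this] at hj
      exact Bool.false_ne_true hj)]
  rw [pv_A_closed value, pv_fold_join (((PySem.Int.band value 65535).toNat).testBit)
    (fun j => pvFaultNames.getD j "" ++ " ") (List.range 16) ""]
  rw [List.range_eq_range']
  simp [String.empty_append]
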